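-- pv_equiv track=rewrite | github.com/m75-ali/recipe-sharing-platform | recipesharing/recipes/views.py | map_category_to_db_category
-- ===== SOURCE A (Python) =====
-- def map_category_to_db_category(category_name):
--     """
--     Maps an AI-generated category to one of the fixed categories in the database
--
--     Args:
--         category_name (str): Category name from the AI
--
--     Returns:
--         str: Mapped category name matching one in the database
--     """
--     category_name = category_name.lower().strip()
--
--     # Direct matches for common categories
--     category_mapping = {
--         'breakfast': 'Breakfast',
--         'brunch': 'Breakfast',
--         'lunch': 'Lunch',
--         'dinner': 'Dinner',
--         'main': 'Dinner',
--         'main course': 'Dinner',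
--         'main dish': 'Dinner',
--         'dessert': 'Dessert',
--         'appetizer': 'Appetizer',
--         'starter': 'Appetizer',
--         'snack': 'Snack',
--         'side': 'Side',
--         'side dish': 'Side'
--     }
--
--     # Check for direct matches
--     for key, value in category_mapping.items():
--         if key == category_name:
--             return value
--
--     # Check for partial matches
--     for key, value in category_mapping.items():
--         if key in category_name:
--             return value
--
--     # Default to 'Other' if no match
--     return 'Other'
-- ===== SOURCE B (Python) =====
-- def map_category_to_db_category(category_name):
--     """Maps an AI-generated category to one of the fixed DB categories.
--
--     Single substring pass: an exact match is a substring of itself, and no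
--     earlier-ordered key is a differently-valued substring of any key, so the
--     merged pass reproduces the exact-then-partial priority of the original.
--     """
--     category_name = category_name.lower().strip()
--     category_mapping = {
--         'breakfast': 'Breakfast',
--         'brunch': 'Breakfast',
--         'lunch': 'Lunch',
--         'dinner': 'Dinner',
--         'main': 'Dinner',
--         'main course': 'Dinner',
--         'main dish': 'Dinner',
--         'dessert': 'Dessert',
--         'appetizer': 'Appetizer',
--         'starter': 'Appetizer',
--         'snack': 'Snack',
--         'side': 'Side',
--         'side dish': 'Side'
--     }
--     return next((value for key, value in category_mapping.items()
--                  if key in category_name), 'Other')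
-- ===== Notes on version B (the rewrite author's own statement) =====
-- stated objective: simpler
-- what changed: The exact-match loop and the partial-match loop are merged into one substring pass (a generator with next and the default fallback); this is exact because no earlier-ordered key is a differently-valued substring of any key.
import Mathlib
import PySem

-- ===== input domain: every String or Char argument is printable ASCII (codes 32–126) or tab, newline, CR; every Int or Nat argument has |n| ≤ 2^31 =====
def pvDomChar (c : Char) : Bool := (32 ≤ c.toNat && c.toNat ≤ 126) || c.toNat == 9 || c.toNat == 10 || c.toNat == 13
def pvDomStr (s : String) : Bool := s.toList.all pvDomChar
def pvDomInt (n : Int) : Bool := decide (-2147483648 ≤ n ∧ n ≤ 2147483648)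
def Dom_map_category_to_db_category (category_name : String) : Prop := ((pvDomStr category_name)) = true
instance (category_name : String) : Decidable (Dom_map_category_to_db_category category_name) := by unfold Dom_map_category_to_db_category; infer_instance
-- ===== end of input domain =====

-- B merges A's exact-match pass and partial-match pass into one substring pass; exact on every input.

-- ===== PORT A =====
-- the dict literal shared by both Pythons
def categoryMapping : List (String × String) :=
  [("breakfast","Breakfast"),("brunch","Breakfast"),("lunch","Lunch"),
   ("dinner","Dinner"),("main","Dinner"),("main course","Dinner"),
   ("main dish","Dinner"),("dessert","Dessert"),("appetizer","Appetizer"),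
   ("starter","Appetizer"),("snack","Snack"),("side","Side"),("side dish","Side")]

-- A's first loop: return value on the first key == category_name
def firstExact : List (String × String) → String → Option String
  | [], _ => none
  | (k,v) :: t, s => if k == s then some v else firstExact t s

-- A's second loop: return value on the first key that is a substring (Python 'in')
def firstPartial : List (String × String) → String → Option String
  | [], _ => none
  | (k,v) :: t, s => if PySem.Str.isIn k s then some v else firstPartial t s

def map_category_to_db_category (category_name : String) : String :=
  let s := PySem.Str.strip (PySem.Str.lower category_name)
  match firstExact categoryMapping s with
  | some v => v
  | none =>
    match firstPartial categoryMapping s with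
    | some v => v
    | none => "Other"

-- ===== PORT B =====
-- B's single loop: first key with 'key in category_name', default 'Other'
def firstContaining : List (String × String) → String → String
  | [], _ => "Other"
  | (k,v) :: t, s => if PySem.Str.isIn k s then v else firstContaining t s

def map_category_to_db_category_alt (category_name : String) : String :=
  firstContaining categoryMapping (PySem.Str.strip (PySem.Str.lower category_name))

-- ===== PRECONDITION & SPEC =====
def Spec_map_category_to_db_category (category_name : String) (out : String) : Prop := out = map_category_to_db_category_alt category_name
instance (category_name : String) (out : String) : Decidable (Spec_map_category_to_db_category category_name out) := by unfold Spec_map_category_to_db_category; infer_instance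

-- ===== CLAIM (what is proved, stated in full; the proofs are below) =====
def Claim_equal_map_category_to_db_category : Prop := ∀ (category_name : String), Dom_map_category_to_db_category category_name → Spec_map_category_to_db_category category_name (map_category_to_db_category category_name)

-- ===== LEMMAS AND PROOFS =====

-- If the exact pass hits, the substring pass on the same ordered mapping hits the same value:
-- a key is a substring of itself, and every earlier key that is a substring of a key maps to the same value.
theorem firstExact_imp_firstPartial (s : String) (v : String)
    (h : firstExact categoryMapping s = some v) :
    firstPartial categoryMapping s = some v := by
  rw [categoryMapping] at h
  rw [firstExact] at h
  by_cases h0 : ("breakfast" == s) = true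
  case pos =>
    rw [beq_iff_eq] at h0; subst h0
    rw [if_pos (by decide)] at h
    injection h with h; subst h; decide
  rw [if_neg (by simpa using h0)] at h
  rw [firstExact] at h
  by_cases h1 : ("brunch" == s) = true
  case pos =>
    rw [beq_iff_eq] at h1; subst h1
    rw [if_pos (by decide)] at h
    injection h with h; subst h; decide
  rw [if_neg (by simpa using h1)] at h
  rw [firstExact] at h
  by_cases h2 : ("lunch" == s) = true
  case pos =>
    rw [beq_iff_eq] at h2; subst h2
    rw [if_pos (by decide)] at h
    injection h with h; subst h; decide
  rw [if_neg (by simpa using h2)] at h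
  rw [firstExact] at h
  by_cases h3 : ("dinner" == s) = true
  case pos =>
    rw [beq_iff_eq] at h3; subst h3
    rw [if_pos (by decide)] at h
    injection h with h; subst h; decide
  rw [if_neg (by simpa using h3)] at h
  rw [firstExact] at h
  by_cases h4 : ("main" == s) = true
  case pos =>
    rw [beq_iff_eq] at h4; subst h4
    rw [if_pos (by decide)] at h
    injection h with h; subst h; decide
  rw [if_neg (by simpa using h4)] at h
  rw [firstExact] at h
  by_cases h5 : ("main course" == s) = true
  case pos =>
    rw [beq_iff_eq] at h5; subst h5
    rw [if_pos (by decide)] at h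
    injection h with h; subst h; decide
  rw [if_neg (by simpa using h5)] at h
  rw [firstExact] at h
  by_cases h6 : ("main dish" == s) = true
  case pos =>
    rw [beq_iff_eq] at h6; subst h6
    rw [if_pos (by decide)] at h
    injection h with h; subst h; decide
  rw [if_neg (by simpa using h6)] at h
  rw [firstExact] at h
  by_cases h7 : ("dessert" == s) = true
  case pos =>
    rw [beq_iff_eq] at h7; subst h7
    rw [if_pos (by decide)] at h
    injection h with h; subst h; decide
  rw [if_neg (by simpa using h7)] at h
  rw [firstExact] at h
  by_cases h8 : ("appetizer" == s) = true
  case pos =>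
    rw [beq_iff_eq] at h8; subst h8
    rw [if_pos (by decide)] at h
    injection h with h; subst h; decide
  rw [if_neg (by simpa using h8)] at h
  rw [firstExact] at h
  by_cases h9 : ("starter" == s) = true
  case pos =>
    rw [beq_iff_eq] at h9; subst h9
    rw [if_pos (by decide)] at h
    injection h with h; subst h; decide
  rw [if_neg (by simpa using h9)] at h
  rw [firstExact] at h
  by_cases h10 : ("snack" == s) = true
  case pos =>
    rw [beq_iff_eq] at h10; subst h10
    rw [if_pos (by decide)] at h
    injection h with h; subst h; decide
  rw [if_neg (by simpa using h10)] at h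
  rw [firstExact] at h
  by_cases h11 : ("side" == s) = true
  case pos =>
    rw [beq_iff_eq] at h11; subst h11
    rw [if_pos (by decide)] at h
    injection h with h; subst h; decide
  rw [if_neg (by simpa using h11)] at h
  rw [firstExact] at h
  by_cases h12 : ("side dish" == s) = true
  case pos =>
    rw [beq_iff_eq] at h12; subst h12
    rw [if_pos (by decide)] at h
    injection h with h; subst h; decide
  rw [if_neg (by simpa using h12)] at h
  rw [firstExact] at h
  cases h

-- If the exact pass misses, A's second loop coincides with B's loop.
theorem firstPartial_eq_firstContaining (m : List (String × String)) (s : String) :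
    (match firstPartial m s with
     | some v => v
     | none => "Other") = firstContaining m s := by
  induction m with
  | nil => rfl
  | cons kv t ih =>
    obtain ⟨k, v⟩ := kv
    rw [firstPartial, firstContaining]
    cases hc : PySem.Str.isIn k s
    · rw [if_neg (by simp [hc]), if_neg (by simp [hc])]; exact ih
    · rw [if_pos (by simp [hc]), if_pos (by simp [hc])]

-- ===== VERDICT (by name: the statement is the Claim_ definition above) =====
theorem map_category_to_db_category_spec : Claim_equal_map_category_to_db_category := by
  intro s _
  unfold Spec_map_category_to_db_category
  simp only [map_category_to_db_category, map_category_to_db_category_alt]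
  generalize PySem.Str.strip (PySem.Str.lower s) = t
  cases h : firstExact categoryMapping t with
  | some v =>
    simp only [h, ← firstPartial_eq_firstContaining, firstExact_imp_firstPartial t v h]
  | none =>
    simp only [h, ← firstPartial_eq_firstContaining]
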